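-- pv_equiv track=rewrite | github.com/uppfinnarjohnny/adventofcode2021 | day3.py | find_most_common_at_index
-- ===== SOURCE A (Python) =====
-- from collections import defaultdict, Counter
--
-- def find_most_common_at_index(lines, index, on_draw):
--     at_index = [l[index] for l in lines]
--     result = Counter(at_index).most_common()
--
--     if len(result) == 1:
--         most_common = result[0][0]
--     elif result[0][1] == result[1][1]:
--         most_common = on_draw
--     else:
--         most_common = result[0][0]
--
--     return most_common
-- ===== SOURCE B (Python) =====
-- def find_most_common_at_index(lines, index, on_draw):
--     counts = {}
--     for l in lines:
--         c = l[index]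
--         counts[c] = counts.get(c, 0) + 1
--     best = ''
--     best_n = 0
--     ties = 0
--     for c, n in counts.items():
--         if n > best_n:
--             best, best_n, ties = c, n, 1
--         elif n == best_n:
--             ties += 1
--     return best if ties == 1 else on_draw
-- ===== Notes on version B (the rewrite author's own statement) =====
-- stated objective: alternative
-- what changed: B replaces Counter(...).most_common() (a full sort of the distinct characters by count) with a hand-built frequency dict and a single linear scan tracking the running maximum count, the first character attaining it, and how many characters attain it; a tie (>=2 at the max) yields on_draw.
import Mathlib
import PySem

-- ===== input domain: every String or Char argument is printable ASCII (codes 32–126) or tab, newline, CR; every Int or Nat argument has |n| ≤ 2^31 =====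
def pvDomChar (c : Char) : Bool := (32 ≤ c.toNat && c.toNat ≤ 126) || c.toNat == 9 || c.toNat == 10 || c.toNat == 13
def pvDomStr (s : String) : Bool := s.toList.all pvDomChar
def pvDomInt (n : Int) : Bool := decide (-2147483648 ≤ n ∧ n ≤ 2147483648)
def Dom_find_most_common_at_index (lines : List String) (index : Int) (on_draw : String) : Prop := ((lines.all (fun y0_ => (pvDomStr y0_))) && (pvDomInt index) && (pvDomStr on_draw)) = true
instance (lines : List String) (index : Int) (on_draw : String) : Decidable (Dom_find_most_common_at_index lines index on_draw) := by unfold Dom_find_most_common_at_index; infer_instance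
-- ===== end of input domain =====

-- B replaces Counter.most_common (a sort by count) by a dict built in one pass plus a single
-- max-and-tie-counting scan over it; same result, no sort (objective: alternative).

-- l[index] as Python computes it: a 1-character string (total form; Pre_ keeps the index in range)
def pvCharAt (index : Int) (l : String) : String :=
  ((PySem.Str.pyGet? l index).map String.singleton).getD ""

-- ===== PORT A =====
def find_most_common_at_index (lines : List String) (index : Int) (on_draw : String) : String :=
  let at_index := lines.map (pvCharAt index)
  -- Counter(at_index).most_common() = items sorted by count, descending, stable
  let result := PySem.List.sorted (PySem.Dict.counter at_index).items (fun p => p.2) true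
  if result.length = 1 then (PySem.List.pyGetD result 0 ("", 0)).1
  else if (PySem.List.pyGetD result 0 ("", 0)).2 = (PySem.List.pyGetD result 1 ("", 0)).2 then on_draw
  else (PySem.List.pyGetD result 0 ("", 0)).1

-- ===== PORT B =====
-- one step of B's scan over counts.items(): state (best, best_n, ties)
def pvScanStep (st : String × Int × Int) (p : String × Int) : String × Int × Int :=
  if st.2.1 < p.2 then (p.1, p.2, 1)
  else if p.2 = st.2.1 then (st.1, st.2.1, st.2.2 + 1)
  else st

def find_most_common_at_index_alt (lines : List String) (index : Int) (on_draw : String) : String :=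
  let counts := lines.foldl (fun d l =>
    d.insert (pvCharAt index l) (d.getD (pvCharAt index l) 0 + 1)) PySem.Dict.empty
  let st := counts.items.foldl pvScanStep ("", 0, 0)
  if st.2.2 = 1 then st.1 else on_draw

-- ===== PRECONDITION & SPEC =====
-- Pre_ excludes exactly the inputs where A raises IndexError: the empty list of lines
-- (result[0] of an empty most_common list) and any line for which l[index] is out of range.
def Pre_find_most_common_at_index (lines : List String) (index : Int) (on_draw : String) : Prop :=
  lines ≠ [] ∧ ∀ l ∈ lines, PySem.Raise.InRange l.toList.length index
instance (lines : List String) (index : Int) (on_draw : String) : Decidable (Pre_find_most_common_at_index lines index on_draw) := by unfold Pre_find_most_common_at_index; infer_instance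
def pvWitness_find_most_common_at_index : List String × Int × String := (["01", "11"], 0, "1")

def Spec_find_most_common_at_index (lines : List String) (index : Int) (on_draw : String) (out : String) : Prop := out = find_most_common_at_index_alt lines index on_draw
instance (lines : List String) (index : Int) (on_draw : String) (out : String) : Decidable (Spec_find_most_common_at_index lines index on_draw out) := by unfold Spec_find_most_common_at_index; infer_instance

-- ===== CLAIM (what is proved, stated in full; the proofs are below) =====
def Claim_equal_find_most_common_at_index : Prop := ∀ (lines : List String) (index : Int) (on_draw : String), Dom_find_most_common_at_index lines index on_draw → Pre_find_most_common_at_index lines index on_draw → Spec_find_most_common_at_index lines index on_draw (find_most_common_at_index lines index on_draw)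

-- ===== LEMMAS AND PROOFS =====

lemma pv_foldl_max_attained (xs : List Int) (a : Int) :
    xs.foldl max a = a ∨ xs.foldl max a ∈ xs := by
  induction xs generalizing a with
  | nil => left; rfl
  | cons x t ih =>
    simp only [List.foldl_cons]
    rcases max_choice a x with hm | hm <;> rw [hm]
    · rcases ih a with h | h
      · left; exact h
      · right; exact List.mem_cons_of_mem _ h
    · rcases ih x with h | h
      · right; rw [h]; exact List.mem_cons_self
      · right; exact List.mem_cons_of_mem _ h

lemma pv_find_max_some (rest : List (String × Int)) (a : Int)
    (h2 : rest.foldl (fun m q => max m q.2) a ≠ a) :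
    ∃ f, rest.find? (fun q => q.2 = rest.foldl (fun m q => max m q.2) a) = some f := by
  have h : rest.foldl (fun m q => max m q.2) a = (rest.map (·.2)).foldl max a := by
    rw [List.foldl_map]
  rcases pv_foldl_max_attained (rest.map (·.2)) a with hc | hc
  · exact absurd (by rw [h, hc]) h2
  · rw [← h] at hc
    obtain ⟨q, hq, hq2⟩ := List.mem_map.mp hc
    have : (rest.find? (fun q => q.2 = rest.foldl (fun m q => max m q.2) a)).isSome := by
      rw [List.find?_isSome]
      exact ⟨q, hq, by simp [hq2]⟩
    exact Option.isSome_iff_exists.mp this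

lemma pv_scan_spec (L : List (String × Int)) (b : String) (n t : Int) :
    L.foldl pvScanStep (b, n, t) =
      (let N := L.foldl (fun m p => max m p.2) n
       if N = n then (b, n, t + L.countP (fun p => p.2 = n))
       else (((L.find? (fun p => p.2 = N)).map Prod.fst).getD b, N, L.countP (fun p => p.2 = N))) := by
  induction L generalizing b n t with
  | nil => simp
  | cons p rest ih =>
    simp only [List.foldl_cons]
    have hmax : ∀ (a : Int), rest.foldl (fun m q => max m q.2) a = (rest.map (·.2)).foldl max a := by
      intro a; rw [List.foldl_map]
    rcases lt_trichotomy n p.2 with h1 | h1 | h1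
    · have hstep : pvScanStep (b, n, t) p = (p.1, p.2, 1) := by
        simp [pvScanStep, h1]
      rw [hstep, ih]
      have hm : max n p.2 = p.2 := max_eq_right h1.le
      simp only [hm]
      have hNp : p.2 ≤ rest.foldl (fun m q => max m q.2) p.2 := by
        rw [hmax]; exact (PySem.List.le_foldl_max _ _).1
      have hNn : ¬ (rest.foldl (fun m q => max m q.2) p.2 = n) := by omega
      by_cases h2 : rest.foldl (fun m q => max m q.2) p.2 = p.2
      · rw [if_pos h2, if_neg hNn, h2]
        rw [List.find?_cons_of_pos (by simp), List.countP_cons_of_pos (by simp)]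
        simp
        omega
      · rw [if_neg h2, if_neg hNn]
        obtain ⟨f, hf⟩ := pv_find_max_some rest p.2 h2
        have hfind : (p :: rest).find? (fun q => q.2 = rest.foldl (fun m q => max m q.2) p.2)
            = some f := by
          rw [List.find?_cons_of_neg (by intro hx; simp at hx; omega)]
          exact hf
        rw [List.countP_cons_of_neg (by intro hx; simp at hx; omega), hfind, hf]
        simp
    · subst h1
      have hstep : pvScanStep (b, p.2, t) p = (b, p.2, t + 1) := by
        simp [pvScanStep]
      rw [hstep, ih]
      simp only [max_self]
      by_cases h2 : rest.foldl (fun m q => max m q.2) p.2 = p.2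
      · rw [if_pos h2, if_pos h2]
        rw [List.countP_cons_of_pos (by simp)]
        simp
        omega
      · rw [if_neg h2, if_neg h2]
        obtain ⟨f, hf⟩ := pv_find_max_some rest p.2 h2
        have hNn : p.2 ≤ rest.foldl (fun m q => max m q.2) p.2 := by
          rw [hmax]; exact (PySem.List.le_foldl_max _ _).1
        have hfind : (p :: rest).find? (fun q => q.2 = rest.foldl (fun m q => max m q.2) p.2)
            = some f := by
          rw [List.find?_cons_of_neg (by intro hx; simp at hx; omega)]
          exact hf
        rw [List.countP_cons_of_neg (by intro hx; simp at hx; omega), hfind, hf]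
    · have hstep : pvScanStep (b, n, t) p = (b, n, t) := by
        unfold pvScanStep
        rw [if_neg (show ¬ (b, n, t).2.1 < p.2 by simp; omega), if_neg (show ¬ p.2 = (b, n, t).2.1 by simp; omega)]
      rw [hstep, ih]
      have hm : max n p.2 = n := by omega
      simp only [hm]
      have hNn : n ≤ rest.foldl (fun m q => max m q.2) n := by
        rw [hmax]; exact (PySem.List.le_foldl_max _ _).1
      by_cases h2 : rest.foldl (fun m q => max m q.2) n = n
      · rw [if_pos h2, if_pos h2]
        rw [List.countP_cons_of_neg (by intro hx; simp at hx; omega)]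
      · rw [if_neg h2, if_neg h2]
        obtain ⟨f, hf⟩ := pv_find_max_some rest n h2
        have hfind : (p :: rest).find? (fun q => q.2 = rest.foldl (fun m q => max m q.2) n)
            = some f := by
          rw [List.find?_cons_of_neg (by intro hx; simp at hx; omega)]
          exact hf
        rw [List.countP_cons_of_neg (by intro hx; simp at hx; omega), hfind, hf]

-- if exactly one position of L satisfies p, any two members satisfying p are equal
lemma pv_countP_one_unique {α : Type} {L : List α} {p : α → Bool} (h : L.countP p = 1)
    {a b : α} (ha : a ∈ L) (hpa : p a) (hb : b ∈ L) (hpb : p b) : a = b := by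
  rw [List.countP_eq_length_filter] at h
  obtain ⟨c, hc⟩ := List.length_eq_one_iff.mp h
  have h1 : a ∈ L.filter p := List.mem_filter.mpr ⟨ha, hpa⟩
  have h2 : b ∈ L.filter p := List.mem_filter.mpr ⟨hb, hpb⟩
  rw [hc] at h1 h2
  simp only [List.mem_singleton] at h1 h2
  rw [h1, h2]

-- ===== VERDICT (by name: the statement is the Claim_ definition above) =====
-- the items of a counter are nonempty for a nonempty source and all counts are ≥ 1
lemma pv_items_pos (xs : List String) (p : String × Int)
    (hp : p ∈ (PySem.Dict.counter xs).items) : 1 ≤ p.2 := by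
  rw [PySem.Dict.items_counter] at hp
  obtain ⟨k, hk, rfl⟩ := List.mem_map.mp hp
  have hkx : k ∈ xs := (PySem.Set.mem_ofList xs k).mp hk
  have : 0 < xs.count k := List.count_pos_iff.mpr hkx
  show (1 : Int) ≤ ((xs.count k : Nat) : Int)
  exact_mod_cast this

lemma pv_items_ne_nil (xs : List String) (hxs : xs ≠ []) :
    (PySem.Dict.counter xs).items ≠ [] := by
  obtain ⟨x, xt, rfl⟩ := List.exists_cons_of_ne_nil hxs
  rw [PySem.Dict.items_counter]
  have hx : x ∈ PySem.Set.ofList (x :: xt) := (PySem.Set.mem_ofList _ _).mpr List.mem_cons_self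
  exact List.ne_nil_of_mem (List.mem_map_of_mem hx)

theorem find_most_common_at_index_spec : Claim_equal_find_most_common_at_index := by
  unfold Claim_equal_find_most_common_at_index
  intro lines index on_draw _ hpre
  unfold Spec_find_most_common_at_index
  obtain ⟨hne, _⟩ := hpre
  simp only [find_most_common_at_index, find_most_common_at_index_alt]
  -- B's dict is Counter(at_index)
  rw [show (lines.foldl (fun d l =>
        d.insert (pvCharAt index l) (d.getD (pvCharAt index l) 0 + 1)) PySem.Dict.empty)
      = PySem.Dict.counter (lines.map (pvCharAt index)) by
    rw [← PySem.Dict.foldl_insert_getD_add_one_eq_counter, List.foldl_map]]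
  set xs := lines.map (pvCharAt index) with hxs
  clear_value xs
  set L := (PySem.Dict.counter xs).items with hL
  clear_value L
  have hxs_ne : xs ≠ [] := by
    rw [hxs]; exact fun h => hne (List.map_eq_nil_iff.mp h)
  have hLne : L ≠ [] := by rw [hL]; exact pv_items_ne_nil xs hxs_ne
  have hLpos : ∀ p ∈ L, 1 ≤ p.2 := by rw [hL]; exact fun p hp => pv_items_pos xs p hp
  set N := L.foldl (fun m p => max m p.2) 0 with hN
  clear_value N
  have hmaxmap : N = (L.map (·.2)).foldl max 0 := by rw [hN, List.foldl_map]
  have hNmax : ∀ y ∈ L, y.2 ≤ N := by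
    intro y hy
    rw [hmaxmap]
    exact (PySem.List.le_foldl_max _ _).2 _ (List.mem_map_of_mem hy)
  have hN1 : 1 ≤ N := by
    obtain ⟨z, zt, hz⟩ := List.exists_cons_of_ne_nil hLne
    have : z ∈ L := by rw [hz]; exact List.mem_cons_self
    exact le_trans (hLpos z this) (hNmax z this)
  -- rewrite B with the scan characterisation
  rw [pv_scan_spec]
  simp only [← hN]
  rw [if_neg (show ¬ (N = 0) by omega)]
  set t := L.countP (fun p => p.2 = N) with ht
  clear_value t
  -- A's sorted list
  set r := PySem.List.sorted L (fun p => p.2) true with hr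
  clear_value r
  obtain ⟨x, rs, hrx⟩ := List.exists_cons_of_ne_nil
    (show r ≠ [] from fun h =>
      hLne ((PySem.List.sorted_eq_nil_iff L _ true).mp (hr.symm.trans h)))
  have hperm : r.Perm L := by rw [hr]; exact PySem.List.sorted_perm L _ true
  have hxmem : x ∈ L := hperm.mem_iff.mp (by rw [hrx]; exact List.mem_cons_self)
  have hxle : ∀ y ∈ L, y.2 ≤ x.2 :=
    PySem.List.key_head_sorted_rev_ge L (fun p => p.2) (hr.symm.trans hrx)
  have hxN : x.2 = N := by
    refine le_antisymm (hNmax x hxmem) ?_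
    rcases pv_foldl_max_attained (L.map (·.2)) 0 with hc | hc
    · omega
    · rw [← hmaxmap] at hc
      obtain ⟨q, hq, hq2⟩ := List.mem_map.mp hc
      rw [← hq2]; exact hxle q hq
  have htr : t = r.countP (fun p => p.2 = N) := by rw [ht]; exact (hperm.countP_eq _).symm
  have ht1 : 1 ≤ t := by
    rw [ht]
    exact List.countP_pos_iff.mpr ⟨x, hxmem, by simp [hxN]⟩
  -- when t = 1 the unique max element is both r's head and B's find? result
  have huniq : t = 1 → (((L.find? (fun p => p.2 = N)).map Prod.fst).getD "") = x.1 := by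
    intro h1
    have hex : (L.find? (fun p => p.2 = N)).isSome :=
      List.find?_isSome.mpr ⟨x, hxmem, by simp [hxN]⟩
    obtain ⟨f, hf⟩ := Option.isSome_iff_exists.mp hex
    have hfx : f = x := pv_countP_one_unique (by rw [← ht]; exact h1)
      (List.mem_of_find?_eq_some hf) (List.find?_some hf) hxmem (by simp [hxN])
    rw [hf, hfx]
    rfl
  rw [hrx]
  rcases rs with _ | ⟨y, rs'⟩
  · -- singleton: unique element, t = 1
    have hlen : L.length = 1 := by rw [← hperm.length_eq, hrx]; rfl
    have htle : t ≤ 1 := by rw [ht, ← hlen]; exact List.countP_le_length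
    have h1 : t = 1 := le_antisymm htle ht1
    rw [if_pos (show List.length [x] = 1 from rfl),
        if_pos (show ((t : Nat) : Int) = 1 by omega), huniq h1,
        PySem.List.pyGetD_zero_cons]
  · -- at least two entries
    rw [if_neg (show ¬ (List.length (x :: y :: rs') = 1) by simp)]
    rw [PySem.List.pyGetD_zero_cons]
    rw [show PySem.List.pyGetD (x :: y :: rs') 1 ("", 0) = y by
      simp [PySem.List.pyGetD_ofNat']]
    have hpw := PySem.List.sorted_pairwise_rev L (fun p => p.2)
    rw [← hr, hrx] at hpw
    by_cases hxy : x.2 = y.2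
    · -- tie at the top: t ≥ 2, both return on_draw
      have h2 : 2 ≤ t := by
        rw [htr, hrx]
        rw [List.countP_cons_of_pos (by simp [hxN]),
            List.countP_cons_of_pos (by simp [← hxy, hxN])]
        omega
      rw [if_pos hxy, if_neg (show ¬ (((t : Nat) : Int) = 1) by omega)]
    · -- unique max: t = 1, both return x.1
      have hyN : y.2 < N := by
        have : y.2 ≤ x.2 := (List.pairwise_cons.mp hpw).1 y List.mem_cons_self
        omega
      have h1 : t = 1 := by
        have hz : (y :: rs').countP (fun p => p.2 = N) = 0 := by
          rw [List.countP_eq_zero]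
          intro z hz
          have : z.2 ≤ y.2 := by
            rcases List.mem_cons.mp hz with rfl | hz'
            · exact le_refl _
            · exact (List.pairwise_cons.mp (List.pairwise_cons.mp hpw).2).1 z hz'
          simp; omega
        rw [htr, hrx, List.countP_cons_of_pos (by simp [hxN]), hz]
      rw [if_neg hxy, if_pos (show ((t : Nat) : Int) = 1 by omega), huniq h1]
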